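-- pv_equiv track=rewrite | github.com/minal540/missing-number-series | series.py | detect_alternating
-- ===== SOURCE A (Python) =====
-- def detect_alternating(series):
--     even_diffs = []
--     odd_diffs = []
--     for i in range(2, len(series)):
--         if i % 2 == 0 and series[i] is not None and series[i-2] is not None:
--             even_diffs.append(series[i] - series[i-2])
--         elif i % 2 == 1 and series[i] is not None and series[i-2] is not None:
--             odd_diffs.append(series[i] - series[i-2])
--     if even_diffs and odd_diffs and len(set(even_diffs)) == 1 and len(set(odd_diffs)) == 1:
--         return ("Alternating", even_diffs[0], odd_diffs[0])
--     return None
-- ===== SOURCE B (Python) =====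
-- def detect_alternating(series):
--     def diffs(sub):
--         return [b - a for a, b in zip(sub, sub[1:])
--                 if a is not None and b is not None]
--     even_diffs = diffs(series[0::2])
--     odd_diffs = diffs(series[1::2])
--     if len(set(even_diffs)) == 1 and len(set(odd_diffs)) == 1:
--         return ("Alternating", even_diffs[0], odd_diffs[0])
--     return None
-- ===== Notes on version B (the rewrite author's own statement) =====
-- stated objective: simpler
-- what changed: B replaces A's single index loop with i%2 branching by an explicit data-shaping step: slice the series into its two parity subsequences (series[0::2], series[1::2]), take each subsequence's consecutive differences via zip(sub, sub[1:]) with a per-pair None guard, and apply the same one-distinct-value test (the explicit nonemptiness checks become redundant and are dropped).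
import Mathlib
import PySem

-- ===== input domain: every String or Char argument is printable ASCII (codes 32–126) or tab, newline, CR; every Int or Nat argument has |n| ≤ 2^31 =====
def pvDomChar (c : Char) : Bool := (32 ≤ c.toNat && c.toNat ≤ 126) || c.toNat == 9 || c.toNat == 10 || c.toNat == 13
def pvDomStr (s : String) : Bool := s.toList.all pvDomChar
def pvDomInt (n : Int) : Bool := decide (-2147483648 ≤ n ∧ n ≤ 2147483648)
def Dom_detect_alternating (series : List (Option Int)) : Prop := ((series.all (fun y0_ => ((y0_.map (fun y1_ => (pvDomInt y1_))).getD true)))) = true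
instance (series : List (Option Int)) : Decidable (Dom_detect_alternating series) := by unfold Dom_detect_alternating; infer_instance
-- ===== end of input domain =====

-- B re-implements A by slicing the series into its two parity subsequences first and
-- differencing each with a zip of itself against its own tail (objective: simpler decomposition).

-- ===== PORT A =====
-- loop body of A's 'for i in range(2, len(series))' (closes over series)
def Abody (series : List (Option Int)) (st : List Int × List Int) (i : Int) : List Int × List Int :=
  if PySem.Int.mod i 2 = 0 then
    -- if i % 2 == 0 and series[i] is not None and series[i-2] is not None
    match PySem.List.pyGet? series i, PySem.List.pyGet? series (i - 2) with
    | some (some a), some (some b) => (st.1 ++ [a - b], st.2)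
    | _, _ => st
  else
    -- elif i % 2 == 1 and … (for an int, i % 2 == 1 is exactly the else branch)
    match PySem.List.pyGet? series i, PySem.List.pyGet? series (i - 2) with
    | some (some a), some (some b) => (st.1, st.2 ++ [a - b])
    | _, _ => st

def detect_alternating (series : List (Option Int)) : Option (String × Int × Int) :=
  let st := (PySem.List.pyRange 2 (series.length : Int) 1).foldl (Abody series) ([], [])
  let even_diffs := st.1
  let odd_diffs := st.2
  if even_diffs ≠ [] ∧ odd_diffs ≠ [] ∧
      (PySem.Set.ofList even_diffs).length = 1 ∧ (PySem.Set.ofList odd_diffs).length = 1 then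
    -- even_diffs[0] / odd_diffs[0]: guarded nonempty, the headD default is unreachable
    some ("Alternating", even_diffs.headD 0, odd_diffs.headD 0)
  else none

-- ===== PORT B =====
-- body of B's comprehension: b - a when both are not None
def pvDiffPair (p : Option Int × Option Int) : Option Int :=
  match p.1, p.2 with
  | some a, some b => some (b - a)
  | _, _ => none

-- diffs(sub) = [b - a for a, b in zip(sub, sub[1:]) if a is not None and b is not None]
def pvDiffsB (sub : List (Option Int)) : List Int :=
  (sub.zip (PySem.List.slice sub (some 1) none)).filterMap pvDiffPair

def detect_alternating_alt (series : List (Option Int)) : Option (String × Int × Int) :=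
  -- series[0::2] / series[1::2]: step 2 ≠ 0, slice? is always some; the getD [] is unreachable
  let evens := (PySem.List.slice? series (some 0) none 2).getD []
  let odds := (PySem.List.slice? series (some 1) none 2).getD []
  let even_diffs := pvDiffsB evens
  let odd_diffs := pvDiffsB odds
  if (PySem.Set.ofList even_diffs).length = 1 ∧ (PySem.Set.ofList odd_diffs).length = 1 then
    some ("Alternating", even_diffs.headD 0, odd_diffs.headD 0)
  else none

-- ===== PRECONDITION & SPEC =====
def Spec_detect_alternating (series : List (Option Int)) (out : Option (String × Int × Int)) : Prop := out = detect_alternating_alt series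
instance (series : List (Option Int)) (out : Option (String × Int × Int)) : Decidable (Spec_detect_alternating series out) := by unfold Spec_detect_alternating; infer_instance

-- ===== CLAIM (what is proved, stated in full; the proofs are below) =====
def Claim_equal_detect_alternating : Prop := ∀ (series : List (Option Int)), Dom_detect_alternating series → Spec_detect_alternating series (detect_alternating series)

-- ===== LEMMAS AND PROOFS =====

-- [y - x] when both present, else []
def optDiff (a b : Option Int) : List Int :=
  match a, b with
  | some x, some y => [y - x]
  | _, _ => []

-- every other element, starting at the head
def eo {α : Type} : List α → List α
  | [] => []
  | a :: r => a :: eo r.tail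
termination_by l => l.length
decreasing_by simp

-- consecutive differences (skipping pairs with a missing element)
def zd : List (Option Int) → List Int
  | a :: b :: r => optDiff a b ++ zd (b :: r)
  | _ => []

lemma eo_nil {α : Type} : eo ([] : List α) = [] := by rw [eo]

lemma eo_cons {α : Type} (a : α) (r : List α) : eo (a :: r) = a :: eo r.tail := by rw [eo]

lemma zd_nil : zd [] = [] := rfl

lemma zd_one (a : Option Int) : zd [a] = [] := rfl

lemma zd_cons2 (a b : Option Int) (r : List (Option Int)) :
    zd (a :: b :: r) = optDiff a b ++ zd (b :: r) := rfl

lemma pyget2 {α : Type} (x y : α) (t : List α) (i : Int) (h : 0 ≤ i) :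
    PySem.List.pyGet? (x :: y :: t) (i + 2) = PySem.List.pyGet? t i := by
  rw [PySem.List.pyGet?_of_nonneg (x :: y :: t) (show (0 : Int) ≤ i + 2 by omega),
    PySem.List.pyGet?_of_nonneg t h]
  have h2 : (i + 2).toNat = i.toNat + 2 := by omega
  rw [h2]
  simp

lemma Abody_shift (x y : Option Int) (t : List (Option Int)) (st : List Int × List Int)
    (i : Int) (h : 2 ≤ i) : Abody (x :: y :: t) st (i + 2) = Abody t st i := by
  have hmod : PySem.Int.mod (i + 2) 2 = PySem.Int.mod i 2 := by
    rw [PySem.Int.mod_eq_emod_of_pos (by omega), PySem.Int.mod_eq_emod_of_pos (by omega)]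
    omega
  have h1 : PySem.List.pyGet? (x :: y :: t) (i + 2) = PySem.List.pyGet? t i :=
    pyget2 x y t i (by omega)
  have h2 : PySem.List.pyGet? (x :: y :: t) (i + 2 - 2) = PySem.List.pyGet? t (i - 2) := by
    have hi : i + 2 - 2 = (i - 2) + 2 := by ring
    rw [hi, pyget2 x y t (i - 2) (by omega)]
  unfold Abody
  rw [hmod, h1, h2]

lemma pyRange_shift2 (b : Int) :
    PySem.List.pyRange 4 b 1 = (PySem.List.pyRange 2 (b - 2) 1).map (· + 2) := by
  rw [PySem.List.pyRange_one, PySem.List.pyRange_one, List.map_map]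
  have h : (b - 4).toNat = (b - 2 - 2).toNat := by omega
  rw [h]
  apply List.map_congr_left
  intro k _
  simp
  ring

lemma G : (series : List (Option Int)) → (e o : List Int) →
    (PySem.List.pyRange 2 (series.length : Int) 1).foldl (Abody series) (e, o)
      = (e ++ zd (eo series), o ++ zd (eo series.tail))
  | [], e, o => by
    simp [PySem.List.pyRange_one_eq_nil (by norm_num : (0 : Int) ≤ 2), eo_nil, zd_nil]
  | [x], e, o => by
    simp [PySem.List.pyRange_one_eq_nil (by norm_num : (1 : Int) ≤ 2), eo_nil, eo_cons, zd_one,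
      zd_nil]
  | [x, y], e, o => by
    simp [PySem.List.pyRange_one_eq_nil (by norm_num : (2 : Int) ≤ 2), eo_nil, eo_cons, zd_one,
      zd_nil, List.tail_cons]
  | [x, y, z0], e, o => by
    have hr : PySem.List.pyRange 2 (([x, y, z0] : List (Option Int)).length : Int) 1 = [2] := by
      simpa using PySem.List.pyRange_one_singleton (a := 2)
    rw [hr]
    have hb : Abody [x, y, z0] (e, o) 2 = (e ++ optDiff x z0, o) := by
      have h2 : ((0 : Int) + 2) = 2 := by norm_num
      have hg : PySem.List.pyGet? [x, y, z0] 2 = some z0 := by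
        rw [← h2, pyget2 x y [z0] 0 le_rfl, PySem.List.pyGet?_zero_cons]
      unfold Abody
      rw [hg]
      norm_num [PySem.List.pyGet?_zero_cons, PySem.Int.mod]
      cases x <;> cases z0 <;> simp [optDiff]
    rw [List.foldl_cons, List.foldl_nil, hb]
    simp [eo_cons, eo_nil, zd_cons2, zd_one, zd_nil, List.tail_cons]
  | x :: y :: z0 :: z1 :: r, e, o => by
    have IH := G (z0 :: z1 :: r)
    have hlen : ((x :: y :: z0 :: z1 :: r : List (Option Int)).length : Int) = (r.length : Int) + 4 := by
      simp only [List.length_cons]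
      push_cast
      ring
    have hsplit : PySem.List.pyRange 2 ((r.length : Int) + 4) 1
        = 2 :: 3 :: PySem.List.pyRange 4 ((r.length : Int) + 4) 1 := by
      rw [PySem.List.pyRange_one_cons (by omega)]
      norm_num
      rw [PySem.List.pyRange_one_cons (by omega)]
      norm_num
    have hshiftrange : PySem.List.pyRange 4 ((r.length : Int) + 4) 1
        = (PySem.List.pyRange 2 (((z0 :: z1 :: r : List (Option Int)).length : Int)) 1).map (· + 2) := by
      rw [pyRange_shift2]
      congr 1
      simp only [List.length_cons]
      push_cast
      ring
    have hg2 : PySem.List.pyGet? (x :: y :: z0 :: z1 :: r) 2 = some z0 := by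
      have h2 : ((0 : Int) + 2) = 2 := by norm_num
      rw [← h2, pyget2 x y (z0 :: z1 :: r) 0 le_rfl, PySem.List.pyGet?_zero_cons]
    have hg3 : PySem.List.pyGet? (x :: y :: z0 :: z1 :: r) 3 = some z1 := by
      have h3 : ((1 : Int) + 2) = 3 := by norm_num
      rw [← h3, pyget2 x y (z0 :: z1 :: r) 1 (by norm_num)]
      have h1 : ((0 : Int) + 1) = 1 := by norm_num
      rw [← h1]
      have hcs := PySem.List.pyGet?_cons_succ (x := z0) (xs := z1 :: r) (n := 0)
      simpa using hcs
    have hb2 : ∀ st : List Int × List Int,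
        Abody (x :: y :: z0 :: z1 :: r) st 2 = (st.1 ++ optDiff x z0, st.2) := by
      intro st
      unfold Abody
      rw [hg2]
      norm_num [PySem.List.pyGet?_zero_cons, PySem.Int.mod]
      cases x <;> cases z0 <;> simp [optDiff]
    have hb3 : ∀ st : List Int × List Int,
        Abody (x :: y :: z0 :: z1 :: r) st 3 = (st.1, st.2 ++ optDiff y z1) := by
      intro st
      unfold Abody
      rw [hg3]
      have hm : PySem.Int.mod 3 2 = 1 := by decide
      have hg1 : PySem.List.pyGet? (x :: y :: z0 :: z1 :: r) (3 - 2) = some y := by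
        norm_num
        have h1 : ((0 : Int) + 1) = 1 := by norm_num
        rw [← h1]
        have hcs := PySem.List.pyGet?_cons_succ (x := x) (xs := y :: z0 :: z1 :: r) (n := 0)
        simpa [PySem.List.pyGet?_zero_cons] using hcs
      rw [hg1, hm]
      norm_num
      cases y <;> cases z1 <;> simp [optDiff]
    rw [hlen, hsplit, List.foldl_cons, List.foldl_cons, hb2, hb3, hshiftrange, List.foldl_map]
    rw [PySem.List.foldl_congr_mem _ _ (Abody (z0 :: z1 :: r)) _
      (by
        intro acc i hi
        have h2le : 2 ≤ i := (PySem.List.mem_pyRange_one.mp hi).1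
        exact Abody_shift x y (z0 :: z1 :: r) acc i h2le)]
    rw [IH]
    simp [eo_cons, eo_nil, zd_cons2, zd_one, zd_nil, List.tail_cons, List.append_assoc]

-- ---------- B side ----------

lemma filterMap_range_eo : (xs : List (Option Int)) →
    List.filterMap (fun k => xs[2 * k]?) (List.range ((xs.length + 1) / 2)) = eo xs
  | [] => by simp [eo_nil]
  | [x] => by simp [eo_cons, eo_nil, List.range_succ_eq_map]
  | x :: y :: t => by
    have hc : ((x :: y :: t : List (Option Int)).length + 1) / 2 = ((t.length + 1) / 2) + 1 := by
      simp only [List.length_cons]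
      omega
    rw [hc, List.range_succ_eq_map, List.filterMap_cons, List.filterMap_map]
    have hf : ∀ k ∈ List.range ((t.length + 1) / 2),
        ((fun k => (x :: y :: t : List (Option Int))[2 * k]?) ∘ Nat.succ) k
          = (fun k => t[2 * k]?) k := by
      intro k _
      have h2 : 2 * Nat.succ k = (2 * k) + 1 + 1 := by omega
      simp [h2]
    rw [List.filterMap_congr hf, filterMap_range_eo t]
    simp [eo_cons, List.tail_cons]

lemma slice?_zero_two (xs : List (Option Int)) :
    PySem.List.slice? xs (some 0) none 2 = some (eo xs) := by
  unfold PySem.List.slice?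
  rw [show PySem.List.sliceIndices xs.length (some 0) none 2 = (0, (xs.length : Int), 2) from by
    simp [PySem.List.sliceIndices]]
  norm_num
  cases xs with
  | nil => simp [eo_nil]
  | cons a l =>
    rw [if_pos (by simp only [List.length_cons]; omega : 0 < (a :: l : List (Option Int)).length)]
    rw [show ((((a :: l : List (Option Int)).length : Int) + 2 - 1) / 2).toNat
        = ((a :: l : List (Option Int)).length + 1) / 2 from by
      simp only [List.length_cons]; push_cast; omega]
    rw [List.filterMap_congr (show ∀ k ∈ List.range (((a :: l : List (Option Int)).length + 1) / 2),
        (fun k : Nat => (a :: l : List (Option Int))[(2 * (k : Int)).toNat]?) k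
          = (fun k : Nat => (a :: l : List (Option Int))[2 * k]?) k from by
      intro k _
      have h : ((2 : Int) * (k : Int)).toNat = 2 * k := by omega
      simp only [h])]
    exact filterMap_range_eo (a :: l)

lemma slice?_one_two (xs : List (Option Int)) :
    PySem.List.slice? xs (some 1) none 2 = some (eo xs.tail) := by
  unfold PySem.List.slice?
  rw [show PySem.List.sliceIndices xs.length (some 1) none 2
      = (min 1 (xs.length : Int), (xs.length : Int), 2) from by
    simp [PySem.List.sliceIndices]]
  norm_num
  cases xs with
  | nil => simp [eo_nil]
  | cons a l =>
    rw [show min (1 : Int) (((a :: l : List (Option Int)).length : Int)) = 1 from by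
      simp only [List.length_cons]; push_cast; omega]
    cases l with
    | nil => simp [eo_nil]
    | cons b m =>
      rw [if_pos (by simp only [List.length_cons]; omega : 1 < (a :: b :: m : List (Option Int)).length)]
      rw [show ((((a :: b :: m : List (Option Int)).length : Int) - 1 + 2 - 1) / 2).toNat
          = ((b :: m : List (Option Int)).length + 1) / 2 from by
        simp only [List.length_cons]; push_cast; omega]
      rw [List.filterMap_congr (show ∀ k ∈ List.range (((b :: m : List (Option Int)).length + 1) / 2),
          (fun k : Nat => (a :: b :: m : List (Option Int))[(1 + 2 * (k : Int)).toNat]?) k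
            = (fun k : Nat => (b :: m : List (Option Int))[2 * k]?) k from by
        intro k _
        have h : ((1 : Int) + 2 * (k : Int)).toNat = (2 * k) + 1 := by omega
        simp only [h]
        simp)]
      exact filterMap_range_eo (b :: m)

lemma optDiff_eq_toList (a b : Option Int) : optDiff a b = (pvDiffPair (a, b)).toList := by
  cases a <;> cases b <;> simp [optDiff, pvDiffPair]

lemma pvDiffsB_eq_zd : (l : List (Option Int)) → pvDiffsB l = zd l
  | [] => by simp [pvDiffsB, zd_nil, PySem.List.slice_from_one]
  | [a] => by simp [pvDiffsB, zd_one, PySem.List.slice_from_one]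
  | a :: b :: r => by
    have IH := pvDiffsB_eq_zd (b :: r)
    unfold pvDiffsB at IH ⊢
    rw [PySem.List.slice_from_one] at IH ⊢
    simp only [List.tail_cons] at IH
    simp only [List.tail_cons, List.zip_cons_cons, List.filterMap_cons]
    rw [zd_cons2, optDiff_eq_toList]
    cases h : pvDiffPair (a, b) <;> simp [h, IH]

lemma setlen_one_ne_nil (l : List Int) (h : (PySem.Set.ofList l).length = 1) : l ≠ [] := by
  intro hl
  subst hl
  exact absurd h (by decide)

-- ===== VERDICT (by name: the statement is the Claim_ definition above) =====
theorem detect_alternating_spec : Claim_equal_detect_alternating := by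
  intro series _
  unfold Spec_detect_alternating detect_alternating detect_alternating_alt
  rw [G series [] [], slice?_zero_two, slice?_one_two]
  simp only [List.nil_append, Option.getD_some, pvDiffsB_eq_zd]
  by_cases h1 : (PySem.Set.ofList (zd (eo series))).length = 1
  · by_cases h2 : (PySem.Set.ofList (zd (eo series.tail))).length = 1
    · rw [if_pos ⟨setlen_one_ne_nil _ h1, setlen_one_ne_nil _ h2, h1, h2⟩, if_pos ⟨h1, h2⟩]
    · rw [if_neg (by tauto), if_neg (by tauto)]
  · rw [if_neg (by tauto), if_neg (by tauto)]
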